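-- pv_equiv track=rewrite | github.com/abhishek17569/Text_summ | run.py | sort_sentences
-- ===== SOURCE A (Python) =====
-- def sort_sentences (original, output):
-- 	sorted_sent_arr = []
-- 	sorted_output = []
-- 	for i in range(0, len(output)):
-- 		if(output[i] in original):
-- 			sorted_sent_arr.append(original.index(output[i]))
-- 	sorted_sent_arr = sorted(sorted_sent_arr)
-- 	for i in range(0, len(sorted_sent_arr)):
-- 		sorted_output.append(original[sorted_sent_arr[i]])
-- 	print (sorted_sent_arr)
-- 	return sorted_output
-- ===== SOURCE B (Python) =====
-- def sort_sentences(original, output):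
--     counts = {}
--     for s in output:
--         counts[s] = counts.get(s, 0) + 1
--     seen = set()
--     result = []
--     for s in original:
--         if s not in seen:
--             seen.add(s)
--             result += [s] * counts.get(s, 0)
--     return result
-- ===== Notes on version B (the rewrite author's own statement) =====
-- stated objective: faster
-- what changed: Replaces the per-element list membership test and list.index scans plus an explicit sort of the index list by a counting pass over output and a single first-occurrence pass over original that emits each sentence count-many times, so no index list, no sort and no inner scans exist.
import Mathlib
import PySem

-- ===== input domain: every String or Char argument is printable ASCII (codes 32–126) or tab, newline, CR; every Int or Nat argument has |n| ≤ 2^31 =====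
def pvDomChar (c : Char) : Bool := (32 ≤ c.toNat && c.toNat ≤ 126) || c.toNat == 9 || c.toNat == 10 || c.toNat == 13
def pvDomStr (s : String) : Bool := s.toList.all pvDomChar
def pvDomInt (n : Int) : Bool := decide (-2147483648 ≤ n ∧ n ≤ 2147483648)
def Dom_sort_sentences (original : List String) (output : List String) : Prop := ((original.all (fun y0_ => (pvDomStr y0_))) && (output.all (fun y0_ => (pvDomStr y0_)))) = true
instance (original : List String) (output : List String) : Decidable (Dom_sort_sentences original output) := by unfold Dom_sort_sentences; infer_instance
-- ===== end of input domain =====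

-- B replaces A's membership/index scans and sort by one counting pass over output and one
-- first-occurrence pass over original (faster); equivalence is about the RETURN value only —
-- A also prints the index list to stdout, B does not.

-- ===== PORT A =====
def sort_sentences (original : List String) (output : List String) : List String :=
  -- sorted_sent_arr: first loop over range(0, len(output))
  let sorted_sent_arr : List Nat :=
    (PySem.List.pyRange 0 (PySem.List.len output)).foldl
      (fun acc i =>
        if (original.contains (PySem.List.pyGetD output i "")) = true then
          acc ++ [(PySem.List.index? original (PySem.List.pyGetD output i "")).getD 0]
        else acc) []
  -- sorted_sent_arr = sorted(sorted_sent_arr)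
  let sorted_sent_arr2 := PySem.List.sorted sorted_sent_arr (fun x => x)
  -- second loop over range(0, len(sorted_sent_arr)); the print has no effect on the return value
  (PySem.List.pyRange 0 (PySem.List.len sorted_sent_arr2)).foldl
    (fun acc i =>
      acc ++ [PySem.List.pyGetD original ((PySem.List.pyGetD sorted_sent_arr2 i 0 : Nat) : Int) ""]) []

-- ===== PORT B =====
def sort_sentences_alt (original : List String) (output : List String) : List String :=
  -- counts[s] = counts.get(s, 0) + 1
  let counts : PySem.Dict String Int :=
    output.foldl (fun d s => d.modify s 0 (fun c => c + 1)) (PySem.Dict.mk [])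
  -- seen = set(); result = []; for s in original: if s not in seen: seen.add(s); result += [s]*counts.get(s,0)
  (original.foldl
    (fun (st : PySem.Set String × List String) s =>
      if !(st.1.contains s) then
        (st.1.add s, st.2 ++ List.replicate (counts.getD s 0).toNat s)
      else st)
    ((PySem.Set.ofList [] : PySem.Set String), ([] : List String))).2

-- ===== PRECONDITION & SPEC =====
def Spec_sort_sentences (original : List String) (output : List String) (out : List String) : Prop := out = sort_sentences_alt original output
instance (original : List String) (output : List String) (out : List String) : Decidable (Spec_sort_sentences original output out) := by unfold Spec_sort_sentences; infer_instance

-- ===== CLAIM (what is proved, stated in full; the proofs are below) =====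
def Claim_equal_sort_sentences : Prop := ∀ (original : List String) (output : List String), Dom_sort_sentences original output → Spec_sort_sentences original output (sort_sentences original output)

-- ===== LEMMAS AND PROOFS =====

-- A's index of v in o (only meaningful when v ∈ o)
def aKey (o : List String) (v : String) : Nat := (PySem.List.index? o v).getD 0

-- A's index list before sorting
def aIdx (o out : List String) : List Nat :=
  (out.filter (fun v => o.contains v)).map (aKey o)

theorem shapeA (o out : List String) :
    sort_sentences o out =
      (PySem.List.sorted (aIdx o out) (fun x => x)).map
        (fun k => PySem.List.pyGetD o ((k : Nat) : Int) "") := by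
  simp only [sort_sentences]
  rw [PySem.List.foldl_pyRange_zero_pyGetD out ""
        (fun (acc : List Nat) v => if (o.contains v) = true then
          acc ++ [(PySem.List.index? o v).getD 0] else acc) [],
      PySem.List.foldl_append_if (fun v => o.contains v)
        (fun v => (PySem.List.index? o v).getD 0) out []]
  rw [PySem.List.foldl_pyRange_zero_pyGetD
        (PySem.List.sorted ([] ++ (out.filter (fun v => o.contains v)).map
          (fun v => (PySem.List.index? o v).getD 0)) (fun x => x)) 0
        (fun (acc : List String) (k : Nat) => acc ++ [PySem.List.pyGetD o ((k : Nat) : Int) ""]) [],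
      PySem.List.foldl_append_singleton_eq_map]
  simp only [aIdx, List.nil_append]
  rfl

theorem aKey_lt (o : List String) (v : String) (h : v ∈ o) : aKey o v < o.length := by
  cases h' : PySem.List.index? o v with
  | none => rw [PySem.List.index?_eq_none_iff] at h'; exact absurd h h'
  | some k =>
    obtain ⟨hk, -, -⟩ := PySem.List.getElem_of_index?_eq_some h'
    simp only [aKey]; rw [h']; simpa using hk

theorem mem_aIdx_lt (o out : List String) (k : Nat) (h : k ∈ aIdx o out) : k < o.length := by
  simp only [aIdx, List.mem_map, List.mem_filter] at h
  obtain ⟨v, ⟨-, hc⟩, rfl⟩ := h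
  exact aKey_lt o v (by simpa using hc)

theorem contains_append_of_mem (o : List String) (x : String) (h : x ∈ o) (w : String) :
    ((o ++ [x]).contains w) = (o.contains w) := by
  by_cases hw : w = x
  · subst hw; simp [h]
  · simp [List.mem_append, hw]

theorem aIdx_append_mem (o out : List String) (x : String) (h : x ∈ o) :
    aIdx (o ++ [x]) out = aIdx o out := by
  unfold aIdx
  simp only [contains_append_of_mem o x h]
  refine List.map_congr_left ?_
  intro v hv
  have hvo : v ∈ o := by simpa using (List.mem_filter.mp hv).2
  simp only [aKey]; rw [PySem.List.index?_append_of_mem _ hvo]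

theorem aIdx_cons_pos (o : List String) (w : String) (rest : List String)
    (hc : (o.contains w) = true) : aIdx o (w :: rest) = aKey o w :: aIdx o rest := by
  have hm : w ∈ o := by simpa using hc
  simp [aIdx, hm]

theorem aIdx_cons_neg (o : List String) (w : String) (rest : List String)
    (hc : (o.contains w) = false) : aIdx o (w :: rest) = aIdx o rest := by
  have hm : w ∉ o := by simpa using hc
  simp [aIdx, hm]

theorem aIdx_append_perm (o out : List String) (x : String) (h : x ∉ o) :
    (aIdx o out ++ List.replicate (out.count x) o.length).Perm (aIdx (o ++ [x]) out) := by
  induction out with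
  | nil => simp [aIdx]
  | cons w rest ih =>
    by_cases hwx : w = x
    · subst hwx
      have h1 : (o.contains w) = false := by simpa using h
      have h2 : ((o ++ [w]).contains w) = true := by simp
      rw [aIdx_cons_neg o w rest h1, aIdx_cons_pos (o ++ [w]) w rest h2,
        List.count_cons_self, List.replicate_succ,
        show aKey (o ++ [w]) w = o.length by
          simp only [aKey]; rw [PySem.List.index?_append_singleton_self o w h]; rfl]
      exact List.perm_middle.trans (ih.cons _)
    · by_cases hwo : w ∈ o
      · have hc1 : (o.contains w) = true := by simpa using hwo
        have hc2 : ((o ++ [x]).contains w) = true := by simp [hwo]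
        rw [aIdx_cons_pos o w rest hc1, aIdx_cons_pos (o ++ [x]) w rest hc2,
          List.count_cons_of_ne hwx,
          show aKey (o ++ [x]) w = aKey o w by
            simp only [aKey]; rw [PySem.List.index?_append_of_mem _ hwo],
          List.cons_append]
        exact ih.cons _
      · have hc1 : (o.contains w) = false := by simpa using hwo
        have hc2 : ((o ++ [x]).contains w) = false := by simp [hwo, hwx]
        rw [aIdx_cons_neg o w rest hc1, aIdx_cons_neg (o ++ [x]) w rest hc2,
          List.count_cons_of_ne hwx]
        exact ih

theorem sorted_aIdx_append (o out : List String) (x : String) (h : x ∉ o) :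
    PySem.List.sorted (aIdx (o ++ [x]) out) (fun k => k) =
      PySem.List.sorted (aIdx o out) (fun k => k) ++ List.replicate (out.count x) o.length := by
  apply PySem.List.sorted_id_eq_of_perm_of_pairwise
  · exact ((PySem.List.sorted_perm (aIdx o out) (fun k => k) false).append_right _).trans
      (aIdx_append_perm o out x h)
  · rw [List.pairwise_append]
    refine ⟨PySem.List.sorted_pairwise (aIdx o out) (fun k => k), ?_, ?_⟩
    · exact List.pairwise_replicate.mpr (Or.inr le_rfl)
    · intro a ha b hb
      rw [List.eq_of_mem_replicate hb]
      exact le_of_lt (mem_aIdx_lt o out a ((PySem.List.mem_sorted _ _ _ _).mp ha))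

theorem map_get_append (o : List String) (x : String) (l : List Nat) (hb : ∀ k ∈ l, k < o.length) :
    l.map (fun k => PySem.List.pyGetD (o ++ [x]) ((k : Nat) : Int) "") =
      l.map (fun k => PySem.List.pyGetD o ((k : Nat) : Int) "") := by
  refine List.map_congr_left ?_
  intro k hk
  have hke := hb k hk
  rw [PySem.List.pyGetD_natCast, PySem.List.pyGetD_natCast]
  simp [List.getD_eq_getElem?_getD, List.getElem?_append_left hke]

theorem get_at_len (o : List String) (x : String) :
    PySem.List.pyGetD (o ++ [x]) ((o.length : Nat) : Int) "" = x := by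
  rw [PySem.List.pyGetD_natCast]
  simp [List.getD_eq_getElem?_getD]

theorem seen_mem (c : String → Nat) (o : List String) (s₀ : PySem.Set String) (r₀ : List String) (x : String) :
    x ∈ (o.foldl
      (fun (st : PySem.Set String × List String) s =>
        if !(st.1.contains s) then (st.1.add s, st.2 ++ List.replicate (c s) s) else st)
      (s₀, r₀)).1 ↔ x ∈ s₀ ∨ x ∈ o := by
  induction o generalizing s₀ r₀ with
  | nil => simp
  | cons s rest ih =>
    simp only [List.foldl_cons]
    by_cases hc : (PySem.Set.contains s₀ s) = true
    · have hs : s ∈ s₀ := by simpa [PySem.Set.contains] using hc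
      rw [show (if !((s₀, r₀).1.contains s) then ((s₀, r₀).1.add s, (s₀, r₀).2 ++ List.replicate (c s) s) else (s₀, r₀)) = (s₀, r₀) by simp [hs]]
      rw [ih]
      constructor
      · rintro (h1 | h1)
        · exact Or.inl h1
        · exact Or.inr (List.mem_cons_of_mem _ h1)
      · rintro (h1 | h1)
        · exact Or.inl h1
        · rcases List.mem_cons.mp h1 with rfl | h2
          · exact Or.inl hs
          · exact Or.inr h2
    · have hs : s ∉ s₀ := by simpa [PySem.Set.contains] using hc
      rw [show (if !((s₀, r₀).1.contains s) then ((s₀, r₀).1.add s, (s₀, r₀).2 ++ List.replicate (c s) s) else (s₀, r₀)) = (s₀.add s, r₀ ++ List.replicate (c s) s) by simp [hs]]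
      rw [ih]
      simp only [PySem.Set.mem_add, List.mem_cons]
      tauto

theorem counts_val (out : List String) (s : String) :
    (out.foldl (fun d s => d.modify s 0 (fun c => c + 1)) (PySem.Dict.mk ([] : List (String × Int)))).getD s 0
      = (out.count s : Int) := by
  rw [PySem.Dict.getD_foldl_modify_add_one]
  simp [PySem.Dict.getD, PySem.Dict.get?]

theorem core (out : List String) (o : List String) :
    (o.foldl
      (fun (st : PySem.Set String × List String) s =>
        if !(st.1.contains s) then (st.1.add s, st.2 ++ List.replicate (out.count s) s) else st)
      ((PySem.Set.ofList [] : PySem.Set String), ([] : List String))).2 =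
    (PySem.List.sorted (aIdx o out) (fun k => k)).map
      (fun k => PySem.List.pyGetD o ((k : Nat) : Int) "") := by
  induction o using List.reverseRecOn with
  | nil => simp [aIdx]
  | append_singleton o x ih =>
    rw [List.foldl_append]
    simp only [List.foldl_cons, List.foldl_nil]
    have hmem := seen_mem (fun s => out.count s) o (PySem.Set.ofList []) [] x
    simp only [PySem.Set.mem_ofList, List.not_mem_nil, false_or] at hmem
    by_cases hx : x ∈ o
    · have hcon : (PySem.Set.contains (o.foldl
        (fun (st : PySem.Set String × List String) s =>
          if !(st.1.contains s) then (st.1.add s, st.2 ++ List.replicate (out.count s) s) else st)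
        ((PySem.Set.ofList [] : PySem.Set String), ([] : List String))).1 x) = true := by
        simpa [PySem.Set.contains] using hmem.mpr hx
      rw [if_neg (by rw [hcon]; decide)]
      rw [ih, aIdx_append_mem o out x hx]
      exact (map_get_append o x _ (fun k hk =>
        mem_aIdx_lt o out k ((PySem.List.mem_sorted _ _ _ _).mp hk))).symm
    · have hcon : (PySem.Set.contains (o.foldl
        (fun (st : PySem.Set String × List String) s =>
          if !(st.1.contains s) then (st.1.add s, st.2 ++ List.replicate (out.count s) s) else st)
        ((PySem.Set.ofList [] : PySem.Set String), ([] : List String))).1 x) = false := by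
        simp only [PySem.Set.contains]
        rw [Bool.eq_false_iff]
        intro hcc
        exact hx (hmem.mp (by simpa [PySem.Set.contains] using hcc))
      rw [if_pos (by rw [hcon]; decide)]
      rw [sorted_aIdx_append o out x hx, List.map_append, List.map_replicate, get_at_len,
        map_get_append o x _ (fun k hk =>
          mem_aIdx_lt o out k ((PySem.List.mem_sorted _ _ _ _).mp hk)), ih]

-- ===== VERDICT (by name: the statement is the Claim_ definition above) =====
theorem sort_sentences_spec : Claim_equal_sort_sentences := by
  intro original output _
  show sort_sentences original output = sort_sentences_alt original output
  rw [shapeA]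
  simp only [sort_sentences_alt]
  have hfn : (fun (st : PySem.Set String × List String) s =>
      if !(st.1.contains s) then
        (st.1.add s, st.2 ++ List.replicate
          (((output.foldl (fun (d : PySem.Dict String Int) s => d.modify s 0 (fun c => c + 1)) (PySem.Dict.mk [])).getD s 0).toNat) s)
      else st)
      = (fun (st : PySem.Set String × List String) s =>
      if !(st.1.contains s) then (st.1.add s, st.2 ++ List.replicate (output.count s) s) else st) := by
    funext st s
    rw [counts_val]
    simp
  rw [hfn, core]
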